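-- pv_equiv track=rewrite | github.com/rothdearl/PyTools | pywalk.py | split_pattern_on_pipe
-- ===== SOURCE A (Python) =====
-- def split_pattern_on_pipe(pattern: str) -> list[str]:
--     """
--     Splits the pattern on the pipe character if it is not preceded by a backslash character.
--     :param pattern: The pattern.
--     :return: A list of patterns.
--     """
--     patterns = []
--     pipe_index = 0
--
--     for index, ch in enumerate(pattern):
--         if index and ch == "|" and pattern[index - 1] != "\\":
--             patterns.append(pattern[pipe_index:index])
--             index += 1
--             pipe_index = index
--
--     patterns.append(pattern[pipe_index:])
--
--     return patterns
-- ===== SOURCE B (Python) =====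
-- def split_pattern_on_pipe(pattern: str) -> list[str]:
--     """Single pass building each segment char by char (no index/slice arithmetic)."""
--     patterns = []
--     current = []
--     prev = None
--     for ch in pattern:
--         if ch == "|" and prev is not None and prev != "\\":
--             patterns.append("".join(current))
--             current = []
--         else:
--             current.append(ch)
--         prev = ch
--     patterns.append("".join(current))
--     return patterns
-- ===== Notes on version B (the rewrite author's own statement) =====
-- stated objective: alternative
-- what changed: Replaces the index/enumerate loop with slice extraction by a single character-by-character pass that accumulates the current segment and remembers only the previous character, so no index arithmetic or slicing remains.
import Mathlib
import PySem

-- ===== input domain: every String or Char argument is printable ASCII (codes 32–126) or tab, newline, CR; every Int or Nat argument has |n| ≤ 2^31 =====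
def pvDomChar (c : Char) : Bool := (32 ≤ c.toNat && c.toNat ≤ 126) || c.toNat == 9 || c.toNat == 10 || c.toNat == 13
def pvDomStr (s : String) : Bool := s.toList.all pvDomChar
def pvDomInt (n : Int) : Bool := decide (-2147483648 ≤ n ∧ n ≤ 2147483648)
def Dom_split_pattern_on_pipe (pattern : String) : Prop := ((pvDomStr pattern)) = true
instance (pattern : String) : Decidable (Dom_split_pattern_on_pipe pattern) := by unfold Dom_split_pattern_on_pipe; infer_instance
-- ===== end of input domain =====

-- B replaces A's index/slice scan by a one-pass accumulator fold (alternative structure, same cost).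

-- ===== PORT A =====
-- the loop body of A: state (patterns, pipe_index), element (index, ch)
def splitA_step (cs : List Char) (st : List String × Int) (e : Int × Char) : List String × Int :=
  if e.1 ≠ 0 ∧ e.2 = '|' ∧ PySem.List.pyGetD cs (e.1 - 1) 'A' ≠ '\\' then
    (st.1 ++ [String.ofList (PySem.List.slice cs (some st.2) (some e.1))], e.1 + 1)
  else st

def split_pattern_on_pipe (pattern : String) : List String :=
  let cs := pattern.toList
  let st := (PySem.List.enumerate cs 0).foldl (splitA_step cs) ([], 0)
  st.1 ++ [String.ofList (PySem.List.slice cs (some st.2) none)]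

-- ===== PORT B =====
-- B's loop body: state (patterns, current segment, previous char)
def splitB_step (st : List String × List Char × Option Char) (ch : Char) :
    List String × List Char × Option Char :=
  if ch = '|' ∧ st.2.2.isSome ∧ st.2.2 ≠ some '\\' then
    (st.1 ++ [String.ofList st.2.1], [], some ch)
  else
    (st.1, st.2.1 ++ [ch], some ch)

def split_pattern_on_pipe_alt (pattern : String) : List String :=
  let st := pattern.toList.foldl splitB_step ([], [], none)
  st.1 ++ [String.ofList st.2.1]

-- ===== PRECONDITION & SPEC =====
def Spec_split_pattern_on_pipe (pattern : String) (out : List String) : Prop := out = split_pattern_on_pipe_alt pattern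
instance (pattern : String) (out : List String) : Decidable (Spec_split_pattern_on_pipe pattern out) := by unfold Spec_split_pattern_on_pipe; infer_instance

-- ===== CLAIM (what is proved, stated in full; the proofs are below) =====
def Claim_equal_split_pattern_on_pipe : Prop := ∀ (pattern : String), Dom_split_pattern_on_pipe pattern → Spec_split_pattern_on_pipe pattern (split_pattern_on_pipe pattern)

-- ===== LEMMAS AND PROOFS =====

-- joint loop invariant: A's fold over the enumerated suffix and B's fold over the suffix
-- produce the same final list, given the states are related.
lemma split_loop_eq (cs : List Char) (rest : List Char) :
    ∀ (n p : Nat) (P : List String),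
      rest = cs.drop n → p ≤ n → n + rest.length = cs.length →
      (let st := (PySem.List.enumerate rest (n : Int)).foldl (splitA_step cs) (P, (p : Int))
       st.1 ++ [String.ofList (PySem.List.slice cs (some st.2) none)])
      =
      (let st := rest.foldl splitB_step
          (P, ((cs.drop p).take (n - p), if n = 0 then none else cs[n-1]?))
       st.1 ++ [String.ofList st.2.1]) := by
  induction rest with
  | nil =>
    intro n p P hrest hp hlen
    simp only [PySem.List.enumerate_nil, List.foldl_nil]
    have hn : n = cs.length := by simpa using hlen
    rw [PySem.List.slice_from_natCast]
    have : (cs.drop p).take (n - p) = cs.drop p := by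
      apply List.take_of_length_le; simp [hn]
    simp [this]
  | cons c rest ih =>
    intro n p P hrest hp hlen
    simp only [List.length_cons] at hlen
    have hnlt : n < cs.length := by omega
    have hc : cs[n] = c := by
      have : (cs.drop n).head? = some c := by rw [← hrest]; rfl
      rw [List.head?_drop] at this
      simpa [List.getElem?_eq_getElem hnlt] using this
    have hprevn : (if n + 1 = 0 then (none : Option Char) else cs[n+1-1]?) = some c := by
      simp [List.getElem?_eq_getElem hnlt, hc]
    rw [PySem.List.enumerate_cons, List.foldl_cons, List.foldl_cons]
    by_cases hcond : (n : Int) ≠ 0 ∧ c = '|' ∧ PySem.List.pyGetD cs ((n : Int) - 1) 'A' ≠ '\\'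
    · -- split branch
      have hn0 : n ≠ 0 := by
        intro h; exact hcond.1 (by simp [h])
      have hprev : cs[n-1]? = some cs[n-1] := List.getElem?_eq_getElem (by omega)
      have hA : PySem.List.pyGetD cs ((n : Int) - 1) 'A' = cs[n-1] := by
        have : ((n : Int) - 1) = ((n - 1 : Nat) : Int) := by omega
        rw [this, PySem.List.pyGetD_natCast, List.getD_eq_getElem?_getD, hprev]
        rfl
      have hcondB : c = '|' ∧ (if n = 0 then (none : Option Char) else cs[n-1]?).isSome
          ∧ (if n = 0 then (none : Option Char) else cs[n-1]?) ≠ some '\\' := by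
        refine ⟨hcond.2.1, by simp [hn0, hprev], ?_⟩
        rw [if_neg hn0, hprev]
        intro h
        exact hcond.2.2 (by rw [hA]; exact Option.some.inj h)
      rw [show splitA_step cs (P, (p : Int)) ((n : Int), c)
            = (P ++ [String.ofList (PySem.List.slice cs (some (p : Int)) (some (n : Int)))], (n : Int) + 1)
          from by simp [splitA_step, hcond, hn0]]
      rw [show splitB_step (P, ((cs.drop p).take (n - p), if n = 0 then none else cs[n-1]?)) c
            = (P ++ [String.ofList ((cs.drop p).take (n - p))], [], some c)
          from by simp [splitB_step, hcondB]]
      have hslice : PySem.List.slice cs (some (p : Int)) (some (n : Int))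
          = (cs.drop p).take (n - p) := PySem.List.slice_natCast ..
      rw [hslice]
      have := ih (n + 1) (n + 1) (P ++ [String.ofList ((cs.drop p).take (n - p))])
        (by rw [← List.drop_drop, ← hrest]; rfl) le_rfl (by omega)
      rw [hprevn] at this
      simp only [Nat.sub_self, List.take_zero] at this
      rw [show ((n : Int) + 1) = ((n + 1 : Nat) : Int) from by push_cast; ring]
      exact this
    · -- no split
      rw [show splitA_step cs (P, (p : Int)) ((n : Int), c) = (P, (p : Int))
          from by simp only [splitA_step, if_neg hcond]]
      have hcondB : ¬ (c = '|' ∧ (if n = 0 then (none : Option Char) else cs[n-1]?).isSome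
          ∧ (if n = 0 then (none : Option Char) else cs[n-1]?) ≠ some '\\') := by
        intro h
        apply hcond
        have hn0 : n ≠ 0 := by
          intro hn; rw [hn] at h; simp at h
        have hprev : cs[n-1]? = some cs[n-1] := List.getElem?_eq_getElem (by omega)
        refine ⟨by simpa using hn0, h.1, ?_⟩
        have hA : PySem.List.pyGetD cs ((n : Int) - 1) 'A' = cs[n-1] := by
          have : ((n : Int) - 1) = ((n - 1 : Nat) : Int) := by omega
          rw [this, PySem.List.pyGetD_natCast, List.getD_eq_getElem?_getD, hprev]
          rfl
        rw [hA]
        have h3 := h.2.2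
        rw [if_neg hn0, hprev] at h3
        simpa using h3
      rw [show splitB_step (P, ((cs.drop p).take (n - p), if n = 0 then none else cs[n-1]?)) c
            = (P, (cs.drop p).take (n - p) ++ [c], some c)
          from by simp only [splitB_step, if_neg hcondB]]
      have hcur : (cs.drop p).take (n - p) ++ [c] = (cs.drop p).take (n + 1 - p) := by
        rw [show n + 1 - p = (n - p) + 1 from by omega, List.take_add_one]
        have : (cs.drop p)[n - p]? = some c := by
          rw [List.getElem?_drop, show p + (n - p) = n from by omega]
          simp [List.getElem?_eq_getElem hnlt, hc]
        simp [this]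
      have := ih (n + 1) p P
        (by rw [← List.drop_drop, ← hrest]; rfl) (by omega) (by omega)
      rw [hprevn] at this
      rw [show ((n : Int) + 1) = ((n + 1 : Nat) : Int) from by push_cast; ring]
      rw [this, hcur]

-- ===== VERDICT (by name: the statement is the Claim_ definition above) =====
theorem split_pattern_on_pipe_spec : Claim_equal_split_pattern_on_pipe := by
  intro pattern _
  unfold Spec_split_pattern_on_pipe split_pattern_on_pipe split_pattern_on_pipe_alt
  have := split_loop_eq pattern.toList pattern.toList 0 0 [] (by simp) le_rfl (by simp)
  simpa using this
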